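-- pv_equiv track=rewrite | github.com/nayangondaliya/NetworkTheory | ArbitraryGraphBalance/ArbitraryGraphBalance/ArbitraryGraphBalance.py | getMatrix
-- ===== SOURCE A (Python) =====
-- def getMatrix(row, column, diagonalInitialiser, initialiser):
--     matrix = []
--
--     for i in range(row):
--         row = []
--         for j in range(column):
--                 row.append(diagonalInitialiser if i == j else initialiser)
--         matrix.append(row)
--     return matrix
-- ===== SOURCE B (Python) =====
-- def getMatrix(row, column, diagonalInitialiser, initialiser):
--     m = max(column, 0)
--     flat = [initialiser] * (row * m)
--     for i in range(min(row, m)):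
--         flat[i * m + i] = diagonalInitialiser
--     return [flat[k * m:(k + 1) * m] for k in range(row)]
-- ===== Notes on version B (the rewrite author's own statement) =====
-- stated objective: alternative
-- what changed: B allocates one flat buffer of row*column cells, patches the min(row,column) diagonal positions i*column+i in a single short loop, and slices the buffer into rows, instead of A's nested loops with a per-cell i==j conditional.
import Mathlib
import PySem

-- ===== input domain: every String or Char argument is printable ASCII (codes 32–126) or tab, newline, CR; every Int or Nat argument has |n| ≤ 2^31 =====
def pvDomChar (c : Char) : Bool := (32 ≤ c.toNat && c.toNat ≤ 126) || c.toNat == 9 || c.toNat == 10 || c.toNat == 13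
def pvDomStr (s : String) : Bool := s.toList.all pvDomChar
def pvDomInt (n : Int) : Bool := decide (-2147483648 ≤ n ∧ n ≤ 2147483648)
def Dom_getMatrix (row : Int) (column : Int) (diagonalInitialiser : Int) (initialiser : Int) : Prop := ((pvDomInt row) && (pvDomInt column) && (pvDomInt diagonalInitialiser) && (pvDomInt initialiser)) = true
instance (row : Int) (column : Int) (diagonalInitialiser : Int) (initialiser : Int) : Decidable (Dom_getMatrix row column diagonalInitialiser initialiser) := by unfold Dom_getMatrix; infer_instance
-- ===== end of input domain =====

-- B builds one flat buffer of row*column cells, patches the diagonal positions i*column+i in a single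
-- short loop, and chops the buffer into rows by slicing — replacing A's nested per-cell `if i == j` loops.

-- ===== PORT A =====
-- for i in range(row): row=[]; for j in range(column): row.append(diag if i==j else ini); matrix.append(row)
def getMatrix (row : Int) (column : Int) (diagonalInitialiser : Int) (initialiser : Int) : List (List Int) :=
  (PySem.List.pyRange 0 row 1).foldl
    (fun matrix i =>
      matrix ++ [(PySem.List.pyRange 0 column 1).foldl
        (fun r j => r ++ [if i = j then diagonalInitialiser else initialiser]) []])
    []

-- ===== PORT B =====
-- m=max(column,0); flat=[ini]*(row*m); for i in range(min(row,m)): flat[i*m+i]=diag;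
-- return [flat[k*m:(k+1)*m] for k in range(row)]
def getMatrix_alt (row : Int) (column : Int) (diagonalInitialiser : Int) (initialiser : Int) : List (List Int) :=
  let m := max column 0
  let flat := List.replicate (row * m).toNat initialiser
  let flat2 := (PySem.List.pyRange 0 (min row m) 1).foldl
    (fun l i => l.set (i * m + i).toNat diagonalInitialiser) flat
  (PySem.List.pyRange 0 row 1).map
    (fun k => PySem.List.slice flat2 (some (k * m)) (some ((k + 1) * m)))

-- ===== PRECONDITION & SPEC =====
def Spec_getMatrix (row : Int) (column : Int) (diagonalInitialiser : Int) (initialiser : Int) (out : List (List Int)) : Prop := out = getMatrix_alt row column diagonalInitialiser initialiser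
instance (row : Int) (column : Int) (diagonalInitialiser : Int) (initialiser : Int) (out : List (List Int)) : Decidable (Spec_getMatrix row column diagonalInitialiser initialiser out) := by unfold Spec_getMatrix; infer_instance

-- ===== CLAIM (what is proved, stated in full; the proofs are below) =====
def Claim_equal_getMatrix : Prop := ∀ (row : Int) (column : Int) (diagonalInitialiser : Int) (initialiser : Int), Dom_getMatrix row column diagonalInitialiser initialiser → Spec_getMatrix row column diagonalInitialiser initialiser (getMatrix row column diagonalInitialiser initialiser)

-- ===== LEMMAS AND PROOFS =====

-- append-style foldl is map
theorem pv_foldl_push {α β : Type} (f : α → β) :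
    ∀ (l : List α) (acc : List β),
      l.foldl (fun r j => r ++ [f j]) acc = acc ++ l.map f := by
  intro l
  induction l with
  | nil => simp
  | cons x xs ih => intro acc; simp [List.foldl, ih]

-- the inner row of A, as a map over List.range, equals a patched replicate
theorem pv_row_eq (d ini : Int) :
    ∀ (n : Nat) (i : Int), 0 ≤ i →
      (List.range n).map (fun k : Nat => if i = (k : Int) then d else ini)
        = if i < (n : Int) then (List.replicate n ini).set i.toNat d
          else List.replicate n ini := by
  intro n
  induction n with
  | zero =>
      intro i hi
      simp only [List.range_zero, List.map_nil, List.replicate_zero]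
      rw [if_neg (by omega)]
  | succ m ih =>
      intro i hi
      rw [List.range_succ, List.map_append, ih i hi, List.map_singleton,
        List.replicate_succ']
      by_cases h1 : i < (m : Int)
      · rw [if_neg (show ¬ i = (m : Int) by omega), if_pos h1,
          if_pos (show i < ((m + 1 : Nat) : Int) by push_cast; omega),
          List.set_append_left _ _ (by simp; omega)]
      · by_cases h2 : i = (m : Int)
        · rw [if_pos h2, if_neg h1,
            if_pos (show i < ((m + 1 : Nat) : Int) by push_cast; omega)]
          have ht : i.toNat = m := by omega
          rw [ht, List.set_append_right _ _ (by simp)]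
          simp
        · rw [if_neg h2, if_neg h1,
            if_neg (show ¬ i < ((m + 1 : Nat) : Int) by push_cast; omega)]

-- A's inner loop produces the patched-replicate row, for nonnegative i
theorem pv_inner_eq (c d ini : Int) (i : Int) (hi : 0 ≤ i) :
    (PySem.List.pyRange 0 c 1).foldl
        (fun r j => r ++ [if i = j then d else ini]) []
      = (if i < c then (List.replicate c.toNat ini).set i.toNat d
         else List.replicate c.toNat ini) := by
  rw [pv_foldl_push (fun j => if i = j then d else ini), List.nil_append,
    PySem.List.pyRange_one, List.map_map]
  have hmap : ((fun j => if i = j then d else ini) ∘ fun k : Nat => (0 : Int) + ↑k)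
      = (fun k : Nat => if i = (k : Int) then d else ini) := by
    funext k; simp
  rw [hmap, pv_row_eq d ini _ i hi]
  by_cases hc : 0 ≤ c
  · have h1 : ((c - 0).toNat : Int) = c := by omega
    have h2 : (c - 0).toNat = c.toNat := by omega
    rw [h1, h2]
  · have h1 : (c - 0).toNat = 0 := by omega
    have h2 : c.toNat = 0 := by omega
    rw [h1, h2, if_neg (by push_cast; omega), if_neg (by omega)]

-- a flat cell index k*M+j determines its row and column
theorem pv_cell_inj {M k j i : Nat} (hj : j < M) (hi : i < M)
    (h : i * M + i = k * M + j) : i = k ∧ j = i := by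
  have hik : i = k := by
    rcases Nat.lt_trichotomy i k with hlt | heq | hgt
    · exfalso; nlinarith
    · exact heq
    · exfalso; nlinarith
  subst hik
  omega

-- the patch loop preserves the buffer's length
theorem pv_patch_length (dg : Int) (M : Nat) :
    ∀ (l : List Nat) (flat : List Int),
      (l.foldl (fun acc i => acc.set (i * M + i) dg) flat).length = flat.length := by
  intro l
  induction l with
  | nil => intro flat; rfl
  | cons x xs ih => intro flat; simp [List.foldl, ih]

-- cell (k,j) of the patched flat buffer, after patching the first d diagonal cells
theorem pv_patch_get (dg ini : Int) (N M : Nat) :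
    ∀ (d : Nat), d ≤ min N M → ∀ (k j : Nat), k < N → j < M →
      ((List.range d).foldl (fun acc i => acc.set (i * M + i) dg)
          (List.replicate (N * M) ini))[k * M + j]?
        = some (if j = k ∧ k < d then dg else ini) := by
  intro d
  induction d with
  | zero =>
      intro _ k j hk hj
      simp only [List.range_zero, List.foldl_nil]
      rw [List.getElem?_replicate, if_pos (by nlinarith)]
      simp
  | succ e ih =>
      intro hd k j hk hj
      rw [List.range_succ, List.foldl_append, List.foldl_cons, List.foldl_nil,
        List.getElem?_set]
      by_cases heq : e * M + e = k * M + j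
      · obtain ⟨hik, hji⟩ := pv_cell_inj hj (by omega) heq
        rw [if_pos heq,
          if_pos (by rw [pv_patch_length]; simp only [List.length_replicate]; nlinarith),
          if_pos (by omega)]
      · rw [if_neg heq, ih (by omega) k j hk hj]
        have hcond : (j = k ∧ k < e + 1) ↔ (j = k ∧ k < e) := by
          constructor
          · rintro ⟨hjk, hke⟩
            refine ⟨hjk, ?_⟩
            rcases Nat.lt_or_ge k e with h | h
            · exact h
            · exfalso
              have hke2 : k = e := by omega
              exact heq (by rw [hjk, hke2])
          · rintro ⟨h1, h2⟩
            exact ⟨h1, by omega⟩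
        simp only [hcond]

-- row K of the patched flat buffer, cut out by drop/take, is the patched-replicate row
theorem pv_chunk (dg ini : Int) (N M K : Nat) (hK : K < N) :
    ((((List.range (min N M)).foldl (fun acc t => acc.set (t * M + t) dg)
        (List.replicate (N * M) ini)).drop (K * M)).take M)
      = if K < M then (List.replicate M ini).set K dg else List.replicate M ini := by
  apply List.ext_getElem?
  intro n
  by_cases hn : n < M
  · rw [List.getElem?_take_of_lt hn, List.getElem?_drop,
      pv_patch_get dg ini N M (min N M) le_rfl K n hK hn]
    have hc : (n = K ∧ K < min N M) ↔ (n = K ∧ K < M) := by omega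
    rw [if_congr hc rfl rfl]
    by_cases hKM : K < M
    · rw [if_pos hKM]
      by_cases hnk : n = K
      · subst hnk
        rw [if_pos ⟨rfl, hKM⟩, List.getElem?_set, if_pos rfl,
          if_pos (show n < (List.replicate M ini).length by simpa using hn)]
      · rw [if_neg (by tauto), List.getElem?_set, if_neg (fun h => hnk h.symm),
          List.getElem?_replicate, if_pos hn]
    · rw [if_neg (by tauto), if_neg hKM, List.getElem?_replicate, if_pos hn]
  · have hM' : M ≤ n := by omega
    rw [List.getElem?_eq_none
      (by simp only [List.length_take]; exact le_trans (min_le_left _ _) hM')]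
    by_cases hKM : K < M
    · rw [if_pos hKM, List.getElem?_eq_none (by simpa using hM')]
    · rw [if_neg hKM, List.getElem?_eq_none (by simpa using hM')]

-- ===== VERDICT (by name: the statement is the Claim_ definition above) =====
theorem getMatrix_spec : Claim_equal_getMatrix := by
  intro row column dg ini _
  unfold Spec_getMatrix getMatrix getMatrix_alt
  rw [pv_foldl_push (fun i => (PySem.List.pyRange 0 column 1).foldl
        (fun r j => r ++ [if i = j then dg else ini]) []), List.nil_append]
  simp only []
  apply List.map_congr_left
  intro i hi
  obtain ⟨h0, hir⟩ := (PySem.List.mem_pyRange_one).1 hi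
  rw [pv_inner_eq column dg ini i h0]
  -- abbreviations
  have hm : max column 0 = ((column.toNat : Nat) : Int) := by omega
  have hi' : i = ((i.toNat : Nat) : Int) := by omega
  have hrow : row = ((row.toNat : Nat) : Int) := by omega
  set M := column.toNat with hM
  set K := i.toNat with hKdef
  set N := row.toNat with hN
  have hKN : K < N := by omega
  -- normalise the slice
  rw [PySem.List.slice_toNat _ (by rw [hm]; positivity) (by rw [hm]; positivity)]
  have hA : (i * max column 0).toNat = K * M := by
    rw [hm, hi']; norm_cast
  have hB : ((i + 1) * max column 0).toNat = K * M + M := by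
    rw [hm, hi']; rw [add_mul, one_mul]; norm_cast
  have hL : (row * max column 0).toNat = N * M := by
    rw [hm, hrow]; norm_cast
  -- normalise the patch loop
  have hD : (min row (max column 0) - 0).toNat = min N M := by rw [hm, hrow]; omega
  rw [PySem.List.pyRange_one, hD, List.foldl_map, hA, hB, hL]
  have hfun : (fun (acc : List Int) (t : Nat) =>
        acc.set (((0 : Int) + ↑t) * max column 0 + ((0 : Int) + ↑t)).toNat dg)
      = fun (acc : List Int) (t : Nat) => acc.set (t * M + t) dg := by
    funext acc t
    congr 1
    rw [hm]; norm_cast; simp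
  rw [hfun, show K * M + M - K * M = M from by omega,
    pv_chunk dg ini N M K hKN]
  have hcond : (i < column) ↔ (K < M) := by omega
  rw [if_congr hcond rfl rfl]
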